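-- pv_equiv track=rewrite | github.com/0xKyma/LinkedInBot | agents/quality.py | _detect_failures
-- ===== SOURCE A (Python) =====
-- def _detect_failures(review_text: str) -> tuple[bool, str]:
--     """Parse review output to find FAIL entries and extract their notes."""
--     lines = review_text.splitlines()
--     failed_sections: list[str] = []
--     current_post = ""
--     in_failed_post = False
--     collecting_issues = False
--     issue_lines: list[str] = []
--
--     for line in lines:
--         stripped = line.strip()
--         if stripped.startswith("POST:"):
--             if in_failed_post and issue_lines:
--                 failed_sections.append(
--                     f"{current_post}\n" + "\n".join(issue_lines)
--                 )
--             current_post = stripped[len("POST:"):].strip()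
--             in_failed_post = False
--             collecting_issues = False
--             issue_lines = []
--         elif stripped.startswith("STATUS:"):
--             status = stripped[len("STATUS:"):].strip().upper()
--             in_failed_post = status == "FAIL"
--         elif stripped.startswith("ISSUES:") and in_failed_post:
--             collecting_issues = True
--         elif collecting_issues and in_failed_post and stripped.startswith("-"):
--             if stripped != "- None":
--                 issue_lines.append(stripped)
--
--     if in_failed_post and issue_lines:
--         failed_sections.append(f"{current_post}\n" + "\n".join(issue_lines))
--
--     has_failures = bool(failed_sections)
--     failed_notes = "\n\n".join(failed_sections)
--     return has_failures, failed_notes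
-- ===== SOURCE B (Python) =====
-- def _detect_failures(review_text: str) -> tuple[bool, str]:
--     """Partition into POST blocks first, then judge each block independently."""
--     lines = review_text.splitlines()
--
--     def is_post(ln: str) -> bool:
--         return ln.strip().startswith("POST:")
--
--     # split into blocks: the prefix before the first POST: gets the empty title
--     blocks = []
--     i = 0
--     while i < len(lines) and not is_post(lines[i]):
--         i += 1
--     blocks.append(("", lines[:i]))
--     while i < len(lines):
--         title = lines[i].strip()[len("POST:"):].strip()
--         j = i + 1
--         while j < len(lines) and not is_post(lines[j]):
--             j += 1
--         blocks.append((title, lines[i + 1:j]))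
--         i = j
--
--     def judge(block):
--         title, body = block
--         in_failed = False
--         collecting = False
--         issues = []
--         for ln in body:
--             s = ln.strip()
--             if s.startswith("STATUS:"):
--                 in_failed = s[len("STATUS:"):].strip().upper() == "FAIL"
--             elif s.startswith("ISSUES:") and in_failed:
--                 collecting = True
--             elif collecting and in_failed and s.startswith("-") and s != "- None":
--                 issues.append(s)
--         if in_failed and issues:
--             return title + "\n" + "\n".join(issues)
--         return None
--
--     sections = [sec for sec in map(judge, blocks) if sec is not None]
--     return bool(sections), "\n\n".join(sections)
-- ===== Notes on version B (the rewrite author's own statement) =====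
-- stated objective: alternative
-- what changed: A runs one monolithic pass whose state (title, flags, issue buffer, emitted sections) is reset in-flight at each POST: line; B first partitions the lines into POST blocks (prefix gets the empty title), then judges each block independently with a small local scan and filters the per-block results.
import Mathlib
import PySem

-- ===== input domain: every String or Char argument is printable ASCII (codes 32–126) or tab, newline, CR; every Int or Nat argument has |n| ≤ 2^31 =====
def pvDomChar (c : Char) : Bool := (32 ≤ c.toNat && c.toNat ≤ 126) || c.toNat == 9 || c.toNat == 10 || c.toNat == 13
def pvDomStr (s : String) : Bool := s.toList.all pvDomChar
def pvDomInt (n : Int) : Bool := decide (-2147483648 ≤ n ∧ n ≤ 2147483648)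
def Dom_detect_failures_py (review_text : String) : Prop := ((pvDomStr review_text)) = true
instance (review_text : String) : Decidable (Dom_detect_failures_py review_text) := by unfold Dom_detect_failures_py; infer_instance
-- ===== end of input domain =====

-- B partitions the review into POST blocks and judges each block locally instead of A's
-- single stateful pass with in-flight resets; same cost, different decomposition.

-- ===== PORT A =====
-- loop body; state: (failed_sections, current_post, in_failed_post, collecting_issues, issue_lines)
def aStep (st : List String × String × Bool × Bool × List String) (line : String) :
    List String × String × Bool × Bool × List String :=
  match st with
  | (secs, cur, f, c, iss) =>
    let s := PySem.Str.strip line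
    if PySem.Str.startswith s "POST:" then
      let secs' := if f && !iss.isEmpty then
          secs ++ [cur ++ "\n" ++ PySem.Str.join "\n" iss] else secs
      (secs', PySem.Str.strip (PySem.Str.slice s (some 5) none), false, false, [])
    else if PySem.Str.startswith s "STATUS:" then
      (secs, cur, PySem.Str.upper (PySem.Str.strip (PySem.Str.slice s (some 7) none)) == "FAIL", c, iss)
    else if PySem.Str.startswith s "ISSUES:" && f then
      (secs, cur, f, true, iss)
    else if c && f && PySem.Str.startswith s "-" then
      if s != "- None" then (secs, cur, f, c, iss ++ [s]) else (secs, cur, f, c, iss)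
    else (secs, cur, f, c, iss)

def detect_failures_py (review_text : String) : Bool × String :=
  let lines := PySem.Str.splitlines review_text
  let r := lines.foldl aStep ([], "", false, false, [])
  let secs := if r.2.2.1 && !r.2.2.2.2.isEmpty then
      r.1 ++ [r.2.1 ++ "\n" ++ PySem.Str.join "\n" r.2.2.2.2] else r.1
  (!secs.isEmpty, PySem.Str.join "\n\n" secs)

-- ===== PORT B =====
def pvIsPost (line : String) : Bool := PySem.Str.startswith (PySem.Str.strip line) "POST:"

-- per-block scan state: (in_failed, collecting, issues)
def bStep (st : Bool × Bool × List String) (line : String) : Bool × Bool × List String :=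
  match st with
  | (f, c, iss) =>
    let s := PySem.Str.strip line
    if PySem.Str.startswith s "STATUS:" then
      (PySem.Str.upper (PySem.Str.strip (PySem.Str.slice s (some 7) none)) == "FAIL", c, iss)
    else if PySem.Str.startswith s "ISSUES:" && f then
      (f, true, iss)
    else if c && f && PySem.Str.startswith s "-" && s != "- None" then
      (f, c, iss ++ [s])
    else (f, c, iss)

def judgeBlock (b : String × List String) : Option String :=
  let r := b.2.foldl bStep (false, false, [])
  if r.1 && !r.2.2.isEmpty then some (b.1 ++ "\n" ++ PySem.Str.join "\n" r.2.2) else none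

def blocksOf : List String → List (String × List String)
  | [] => []
  | l :: ls =>
    (PySem.Str.strip (PySem.Str.slice (PySem.Str.strip l) (some 5) none),
      ls.takeWhile (fun x => !pvIsPost x)) :: blocksOf (ls.dropWhile (fun x => !pvIsPost x))
termination_by ls => ls.length
decreasing_by
  exact Nat.lt_succ_of_le (List.length_dropWhile_le _ _)

def detect_failures_py_alt (review_text : String) : Bool × String :=
  let lines := PySem.Str.splitlines review_text
  let blocks := ("", lines.takeWhile (fun x => !pvIsPost x)) ::
      blocksOf (lines.dropWhile (fun x => !pvIsPost x))
  let sections := blocks.filterMap judgeBlock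
  (!sections.isEmpty, PySem.Str.join "\n\n" sections)

-- ===== PRECONDITION & SPEC =====
def Spec_detect_failures_py (review_text : String) (out : Bool × String) : Prop := out = detect_failures_py_alt review_text
instance (review_text : String) (out : Bool × String) : Decidable (Spec_detect_failures_py review_text out) := by unfold Spec_detect_failures_py; infer_instance

-- ===== CLAIM (what is proved, stated in full; the proofs are below) =====
def Claim_equal_detect_failures_py : Prop := ∀ (review_text : String), Dom_detect_failures_py review_text → Spec_detect_failures_py review_text (detect_failures_py review_text)

-- ===== LEMMAS AND PROOFS =====

-- the section list a finished block contributes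
def pvSec (cur : String) (f : Bool) (iss : List String) : List String :=
  if f && !iss.isEmpty then [cur ++ "\n" ++ PySem.Str.join "\n" iss] else []

lemma pvFlush_eq (secs : List String) (cur : String) (f : Bool) (iss : List String) :
    (if f && !iss.isEmpty then secs ++ [cur ++ "\n" ++ PySem.Str.join "\n" iss] else secs)
      = secs ++ pvSec cur f iss := by
  unfold pvSec
  by_cases h : f && !iss.isEmpty <;> simp [h]

lemma judgeBlock_toList (t : String) (body : List String) :
    (judgeBlock (t, body)).toList
      = pvSec t (body.foldl bStep (false, false, [])).1 (body.foldl bStep (false, false, [])).2.2 := by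
  unfold judgeBlock pvSec
  by_cases h : (body.foldl bStep (false, false, [])).1 && !(body.foldl bStep (false, false, [])).2.2.isEmpty <;>
    simp [h]

lemma filterMap_cons_toList {α β : Type} (g : α → Option β) (x : α) (xs : List α) :
    List.filterMap g (x :: xs) = (g x).toList ++ List.filterMap g xs := by
  cases h : g x <;> simp [h]

lemma aStep_nonpost (secs : List String) (cur : String) (f c : Bool) (iss : List String)
    (l : String) (h : pvIsPost l = false) :
    aStep (secs, cur, f, c, iss) l = (secs, cur, bStep (f, c, iss) l) := by
  unfold aStep bStep
  unfold pvIsPost at h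
  simp only [h, Bool.false_eq_true, if_false]
  split_ifs with h1 h2 h3 h4 h5 <;> simp_all

lemma aStep_post (secs : List String) (cur : String) (f c : Bool) (iss : List String)
    (l : String) (h : pvIsPost l = true) :
    aStep (secs, cur, f, c, iss) l
      = (secs ++ pvSec cur f iss,
          PySem.Str.strip (PySem.Str.slice (PySem.Str.strip l) (some 5) none), false, false, []) := by
  simp only [aStep]
  unfold pvIsPost at h
  rw [if_pos h, pvFlush_eq]

lemma main_lemma (lines : List String) :
    ∀ (secs : List String) (cur : String) (f c : Bool) (iss : List String),
    (lines.foldl aStep (secs, cur, f, c, iss)).1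
      ++ pvSec (lines.foldl aStep (secs, cur, f, c, iss)).2.1
               (lines.foldl aStep (secs, cur, f, c, iss)).2.2.1
               (lines.foldl aStep (secs, cur, f, c, iss)).2.2.2.2
    = secs
      ++ pvSec cur ((lines.takeWhile (fun x => !pvIsPost x)).foldl bStep (f, c, iss)).1
                   ((lines.takeWhile (fun x => !pvIsPost x)).foldl bStep (f, c, iss)).2.2
      ++ (blocksOf (lines.dropWhile (fun x => !pvIsPost x))).filterMap judgeBlock := by
  induction lines with
  | nil =>
    intro secs cur f c iss
    simp [blocksOf]
  | cons l ls ih =>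
    intro secs cur f c iss
    by_cases hp : pvIsPost l
    · rw [List.foldl_cons, aStep_post secs cur f c iss l hp]
      rw [ih (secs ++ pvSec cur f iss)
          (PySem.Str.strip (PySem.Str.slice (PySem.Str.strip l) (some 5) none)) false false []]
      have htw : (l :: ls).takeWhile (fun x => !pvIsPost x) = [] := by
        simp [List.takeWhile, hp]
      have hdw : (l :: ls).dropWhile (fun x => !pvIsPost x) = l :: ls := by
        simp [List.dropWhile, hp]
      rw [htw, hdw, blocksOf, filterMap_cons_toList, judgeBlock_toList]
      simp [List.append_assoc]
    · have hp' : pvIsPost l = false := by simp [hp]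
      rw [List.foldl_cons, aStep_nonpost secs cur f c iss l hp']
      have htw : (l :: ls).takeWhile (fun x => !pvIsPost x)
          = l :: ls.takeWhile (fun x => !pvIsPost x) := by
        simp [List.takeWhile, hp']
      have hdw : (l :: ls).dropWhile (fun x => !pvIsPost x)
          = ls.dropWhile (fun x => !pvIsPost x) := by
        simp [List.dropWhile, hp']
      rw [htw, hdw]
      rcases hbs : bStep (f, c, iss) l with ⟨f1, c1, iss1⟩
      rw [ih secs cur f1 c1 iss1, List.foldl_cons, hbs]

-- ===== VERDICT (by name: the statement is the Claim_ definition above) =====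
theorem detect_failures_py_spec : Claim_equal_detect_failures_py := by
  intro review_text _
  unfold Spec_detect_failures_py
  show detect_failures_py review_text = detect_failures_py_alt review_text
  unfold detect_failures_py detect_failures_py_alt
  simp only [pvFlush_eq]
  rw [main_lemma (PySem.Str.splitlines review_text) [] "" false false []]
  rw [filterMap_cons_toList, judgeBlock_toList]
  simp
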